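-- pv_equiv track=rewrite | github.com/benadida/helios-server | zeus/utils.py | undecalize
-- ===== SOURCE A (Python) =====
-- def undecalize(string):
--     i = 2
--     s = ''
--     d = 0
--     for z, c in enumerate(string):
--         if not c.isdigit():
--             continue
--         i -= 1
--         d *= 10
--         d += int(c, 10)
--         if not i:
--             d += 32
--             if d > 127:
--                 m = "index %d: invalid ASCII code %d > 127" % (z, d)
--                 raise ValueError(m)
--             s += chr(d)
--             d = 0
--             i = 2
--
--     if i != 2:
--         m = "Input has an odd number of decimal digits: %d" % (z + 1)
--         raise ValueError(m)
--
--     return s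
-- ===== SOURCE B (Python) =====
-- def undecalize(string):
--     digits = [(z, c) for z, c in enumerate(string) if c.isdigit()]
--     it = iter(digits)
--     out = []
--     for (_, c1), (z2, c2) in zip(it, it):
--         d = int(c1, 10) * 10 + int(c2, 10) + 32
--         if d > 127:
--             raise ValueError("index %d: invalid ASCII code %d > 127" % (z2, d))
--         out.append(chr(d))
--     if len(digits) % 2:
--         raise ValueError("Input has an odd number of decimal digits: %d" % len(string))
--     return ''.join(out)
-- ===== Notes on version B (the rewrite author's own statement) =====
-- stated objective: idiomatic
-- what changed: Replaces A's stateful digit-counter machine (countdown i, running accumulator d mutated per character) with a filter-then-pair decomposition: collect the (index,digit) positions in one comprehension, pair consecutive digits with the zip(it,it) idiom, and map each pair to its character.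
import Mathlib
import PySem

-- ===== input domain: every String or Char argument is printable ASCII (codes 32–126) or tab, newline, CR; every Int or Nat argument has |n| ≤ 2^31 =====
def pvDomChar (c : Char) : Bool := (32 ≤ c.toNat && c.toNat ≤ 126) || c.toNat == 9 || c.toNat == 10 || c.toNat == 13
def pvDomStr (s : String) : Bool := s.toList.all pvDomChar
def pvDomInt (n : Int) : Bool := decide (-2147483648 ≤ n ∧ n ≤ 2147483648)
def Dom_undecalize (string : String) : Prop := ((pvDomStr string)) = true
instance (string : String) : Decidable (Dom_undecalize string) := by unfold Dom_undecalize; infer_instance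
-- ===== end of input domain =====

-- B replaces A's stateful digit-counter machine by an idiomatic filter-then-pair decomposition; same complexity.
-- Pre_ excludes exactly the inputs on which Python A raises ValueError (odd digit count or a decoded code > 127);
-- there both Pythons raise the same error.

-- ===== PORT A =====
-- A's loop body on the state (i, s, d), exactly as the Python for-loop mutates it.
-- int(c, 10) for a char that passed c.isdigit() (ASCII domain) is its code minus 48: exact here.
-- The two raise paths are unreachable under Pre_ (the port keeps looping / returns the accumulated s).
def pvStepA (st : Int × List Char × Int) (c : Char) : Int × List Char × Int :=
  if ¬ PySem.Chars.isdigit c then st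
  else
    let i := st.1 - 1
    let d := st.2.2 * 10 + ((c.toNat : Int) - 48)
    if i = 0 then (2, st.2.1 ++ [Char.ofNat (d + 32).toNat], 0)
    else (i, st.2.1, d)

def undecalize (string : String) : String :=
  String.ofList (string.toList.foldl pvStepA (2, ([] : List Char), 0)).2.1

-- ===== PORT B =====
-- zip(it, it) over one iterator pairs consecutive elements (dropping a trailing odd one): ported as
-- the structural pairing pvPairUp, exact for that idiom.
def pvPairUp {α : Type} : List α → List (α × α)
  | a :: b :: rest => (a, b) :: pvPairUp rest
  | _ => []

-- B's loop body: decode one pair of enumerated digit characters and append the character.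
def pvStepB (acc : List Char) (pq : (Int × Char) × (Int × Char)) : List Char :=
  let d := (pq.1.2.toNat - 48) * 10 + (pq.2.2.toNat - 48) + 32
  acc ++ [Char.ofNat d]

def undecalize_alt (string : String) : String :=
  String.ofList ((pvPairUp ((PySem.List.enumerate string.toList).filter
    (fun p => PySem.Chars.isdigit p.2))).foldl pvStepB [])

-- ===== PRECONDITION & SPEC =====
-- Pre_: exactly the inputs where Python A returns: an even number of digit characters, and every
-- consecutive digit pair decodes to an ASCII code ≤ 127 (i.e. pair value ≤ 95).
def Pre_undecalize (string : String) : Prop :=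
  let ds := string.toList.filter PySem.Chars.isdigit
  ds.length % 2 = 0 ∧
  ∀ i ∈ List.range ds.length, 2 * i + 1 < ds.length →
    ((ds.getD (2 * i) ' ').toNat - 48) * 10 + ((ds.getD (2 * i + 1) ' ').toNat - 48) ≤ 95
instance (string : String) : Decidable (Pre_undecalize string) := by
  unfold Pre_undecalize; infer_instance

def pvWitness_undecalize : String := "a1b5x33"

def Spec_undecalize (string : String) (out : String) : Prop := out = undecalize_alt string
instance (string : String) (out : String) : Decidable (Spec_undecalize string out) := by
  unfold Spec_undecalize; infer_instance

-- ===== CLAIM (what is proved, stated in full; the proofs are below) =====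
def Claim_equal_undecalize : Prop :=
  ∀ (string : String), Dom_undecalize string → Pre_undecalize string →
    Spec_undecalize string (undecalize string)

-- ===== LEMMAS AND PROOFS =====

-- the common characterisation: decode the digit list two characters at a time
def pvPairs : List Char → List Char
  | a :: b :: rest =>
      Char.ofNat ((a.toNat - 48) * 10 + (b.toNat - 48) + 32) :: pvPairs rest
  | _ => []

-- A's step ignores non-digit characters, so the fold only sees the digit filter
theorem pv_foldl_filter (l : List Char) (st : Int × List Char × Int) :
    l.foldl pvStepA st = (l.filter PySem.Chars.isdigit).foldl pvStepA st := by
  induction l generalizing st with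
  | nil => rfl
  | cons c l ih =>
      by_cases h : PySem.Chars.isdigit c = true
      · simp only [List.filter_cons, h, ite_true, List.foldl_cons, ih]
      · have hs : pvStepA st c = st := by simp [pvStepA, h]
        simp only [List.filter_cons, h, Bool.false_eq_true, ite_false, List.foldl_cons, hs, ih]

-- digit characters have codes 48..57
theorem pv_isdigit_bounds (c : Char) (h : PySem.Chars.isdigit c = true) :
    48 ≤ c.toNat ∧ c.toNat ≤ 57 := by
  have h1 : ('0':Char) ≤ c ∧ c ≤ '9' := by simpa [PySem.Chars.isdigit] using h
  obtain ⟨h2, h3⟩ := h1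
  rw [Char.le_def] at h2 h3
  exact ⟨UInt32.le_iff_toNat_le.mp h2, UInt32.le_iff_toNat_le.mp h3⟩

-- A's fold on a list of digit characters of even length appends exactly pvPairs
theorem pv_foldA_pairs (ds : List Char) (hd : ∀ c ∈ ds, PySem.Chars.isdigit c = true)
    (he : ds.length % 2 = 0) (s : List Char) :
    ds.foldl pvStepA (2, s, 0) = (2, s ++ pvPairs ds, 0) := by
  induction ds using pvPairs.induct generalizing s with
  | case1 a b rest ih =>
      have ha := hd a (by simp)
      have hb := hd b (by simp)
      obtain ⟨ha1, ha2⟩ := pv_isdigit_bounds a ha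
      obtain ⟨hb1, hb2⟩ := pv_isdigit_bounds b hb
      have hrest : ∀ c ∈ rest, PySem.Chars.isdigit c = true := by
        intro c hc; exact hd c (by simp [hc])
      have he' : rest.length % 2 = 0 := by simp at he; omega
      have hstep : pvStepA (pvStepA (2, s, 0) a) b
          = (2, s ++ [Char.ofNat ((a.toNat - 48) * 10 + (b.toNat - 48) + 32)], 0) := by
        simp only [pvStepA, ha, hb, not_true, if_false]
        norm_num
        congr 1
        omega
      rw [List.foldl_cons, List.foldl_cons, hstep, ih hrest he']
      simp [pvPairs]
  | case2 x hx =>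
      rcases x with _ | ⟨a, _ | ⟨b, r⟩⟩
      · simp [pvPairs]
      · simp at he
      · exact absurd rfl (hx a b r)

-- B's fold over the paired list appends exactly pvPairs of the second components
theorem pv_foldB_pairs (es : List (Int × Char)) (acc : List Char) :
    (pvPairUp es).foldl pvStepB acc = acc ++ pvPairs (es.map Prod.snd) := by
  induction es using pvPairUp.induct generalizing acc with
  | case1 a b rest ih =>
      simp [pvPairUp, pvStepB, pvPairs, ih]
  | case2 x hx =>
      rcases x with _ | ⟨a, _ | ⟨b, r⟩⟩
      · simp [pvPairUp, pvPairs]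
      · simp [pvPairUp, pvPairs]
      · exact absurd rfl (hx a b r)

-- filtering the enumerated list and dropping indices = filtering the characters
theorem pv_enum_filter_snd (l : List Char) (s : Int) :
    (((PySem.List.enumerate l s).filter (fun p => PySem.Chars.isdigit p.2)).map Prod.snd)
    = l.filter PySem.Chars.isdigit := by
  induction l generalizing s with
  | nil => simp [PySem.List.enumerate_nil]
  | cons c l ih =>
      by_cases h : PySem.Chars.isdigit c = true
      · simp [PySem.List.enumerate_cons, h, ih]
      · simp [PySem.List.enumerate_cons, h, ih]

-- ===== VERDICT (by name: the statement is the Claim_ definition above) =====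
theorem undecalize_spec : Claim_equal_undecalize := by
  intro string _ hpre
  obtain ⟨he, _⟩ := hpre
  unfold Spec_undecalize undecalize undecalize_alt
  rw [pv_foldl_filter,
      pv_foldA_pairs _ (fun c hc => (List.mem_filter.mp hc).2) he,
      pv_foldB_pairs, pv_enum_filter_snd]
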